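-- pv_equiv track=rewrite | github.com/tonnysantos001-source/SyncAds | python-service/app/browser_ai/dom_intelligence.py | _is_signup_form
-- ===== SOURCE A (Python) =====
-- from typing import Any, Dict, List, Literal, Optional, Set, Tuple
--
-- def _is_signup_form(fields: List[Dict]) -> bool:
--     """Verifica se é formulário de cadastro"""
--     has_name = False
--     has_email = False
--     has_password = False
--
--     for field in fields:
--         semantic = field.get("semantic_type", "")
--         if semantic == "name":
--             has_name = True
--         if semantic == "email":
--             has_email = True
--         if semantic == "password":
--             has_password = True
--
--     return has_name and has_email and has_password
-- ===== SOURCE B (Python) =====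
-- def _is_signup_form(fields):
--     """Verifica se é formulário de cadastro"""
--     return all(
--         any(field.get("semantic_type", "") == target for field in fields)
--         for target in ("name", "email", "password")
--     )
-- ===== Notes on version B (the rewrite author's own statement) =====
-- stated objective: idiomatic
-- what changed: Inverts the loop structure: instead of one pass over fields updating three boolean flags, B loops over the three required labels and performs a separate any-scan of fields for each, combined with all().
import Mathlib
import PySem

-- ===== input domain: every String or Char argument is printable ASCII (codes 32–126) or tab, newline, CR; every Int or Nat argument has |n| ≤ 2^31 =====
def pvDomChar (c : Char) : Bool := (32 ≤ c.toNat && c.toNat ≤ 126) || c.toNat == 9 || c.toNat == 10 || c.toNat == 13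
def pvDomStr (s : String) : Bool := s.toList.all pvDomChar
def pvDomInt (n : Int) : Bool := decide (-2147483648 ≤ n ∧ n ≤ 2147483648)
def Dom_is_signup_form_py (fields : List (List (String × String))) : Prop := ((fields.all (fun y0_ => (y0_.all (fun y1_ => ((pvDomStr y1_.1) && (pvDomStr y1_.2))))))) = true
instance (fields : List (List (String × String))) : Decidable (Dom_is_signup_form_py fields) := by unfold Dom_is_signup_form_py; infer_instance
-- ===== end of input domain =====

-- B inverts the loops: one any-scan of fields per required label, combined with all, instead of A's single pass over fields updating three flags (idiomatic; same value).

-- ===== PORT A =====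
def is_signup_form_py (fields : List (List (String × String))) : Bool :=
  let st := fields.foldl (fun (st : Bool × Bool × Bool) field =>
    let semantic := PySem.Dict.getD (PySem.Dict.mk field) "semantic_type" ""
    let st := if semantic == "name" then (true, st.2.1, st.2.2) else st
    let st := if semantic == "email" then (st.1, true, st.2.2) else st
    let st := if semantic == "password" then (st.1, st.2.1, true) else st
    st) (false, false, false)
  st.1 && st.2.1 && st.2.2

-- ===== PORT B =====
def is_signup_form_py_alt (fields : List (List (String × String))) : Bool :=
  ["name", "email", "password"].all (fun target =>
    fields.any (fun field => PySem.Dict.getD (PySem.Dict.mk field) "semantic_type" "" == target))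

-- ===== PRECONDITION & SPEC =====
def Spec_is_signup_form_py (fields : List (List (String × String))) (out : Bool) : Prop := out = is_signup_form_py_alt fields
instance (fields : List (List (String × String))) (out : Bool) : Decidable (Spec_is_signup_form_py fields out) := by unfold Spec_is_signup_form_py; infer_instance

-- ===== CLAIM =====
def Claim_equal_is_signup_form_py : Prop := ∀ (fields : List (List (String × String))), Dom_is_signup_form_py fields → Spec_is_signup_form_py fields (is_signup_form_py fields)

-- ===== LEMMAS AND PROOFS =====

-- Folding three OR-flags over a list tests three predicates with `any`.
theorem pv_fold_or_flags {α : Type} (p q r : α → Bool) (l : List α) (a b c : Bool) :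
    l.foldl (fun (st : Bool × Bool × Bool) x => (st.1 || p x, st.2.1 || q x, st.2.2 || r x)) (a, b, c)
    = (a || l.any p, b || l.any q, c || l.any r) := by
  induction l generalizing a b c with
  | nil => simp
  | cons x t ih => simp [List.foldl_cons, ih, Bool.or_assoc]

-- A's step function is pointwise the three-OR-flag step.
theorem pv_stepA_eq :
    (fun (st : Bool × Bool × Bool) (field : List (String × String)) =>
      let semantic := PySem.Dict.getD (PySem.Dict.mk field) "semantic_type" ""
      let st := if semantic == "name" then (true, st.2.1, st.2.2) else st
      let st := if semantic == "email" then (st.1, true, st.2.2) else st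
      let st := if semantic == "password" then (st.1, st.2.1, true) else st
      st)
    = (fun (st : Bool × Bool × Bool) field =>
        (st.1 || (PySem.Dict.getD (PySem.Dict.mk field) "semantic_type" "" == "name"),
         st.2.1 || (PySem.Dict.getD (PySem.Dict.mk field) "semantic_type" "" == "email"),
         st.2.2 || (PySem.Dict.getD (PySem.Dict.mk field) "semantic_type" "" == "password"))) := by
  funext st field
  by_cases h1 : PySem.Dict.getD (PySem.Dict.mk field) "semantic_type" "" = "name" <;>
    by_cases h2 : PySem.Dict.getD (PySem.Dict.mk field) "semantic_type" "" = "email" <;>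
      by_cases h3 : PySem.Dict.getD (PySem.Dict.mk field) "semantic_type" "" = "password" <;>
        simp_all [Bool.beq_eq_decide_eq]

-- ===== VERDICT =====
theorem is_signup_form_py_spec : Claim_equal_is_signup_form_py := by
  intro fields _
  unfold Spec_is_signup_form_py is_signup_form_py is_signup_form_py_alt
  rw [pv_stepA_eq, pv_fold_or_flags]
  simp [List.all_cons, Bool.and_assoc]
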